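-- pv_equiv track=rewrite | github.com/shubham3-ucb/sparse-attention-hub | plot_ruler16k.py | group_mask_metrics_by_sample
-- ===== SOURCE A (Python) =====
-- from typing import Dict, List, Tuple, Any, Optional
--
-- def group_metrics_by_sample(metrics: List[Dict], chunk_threshold: int = 100) -> List[List[Dict]]:
--     """
--     Group metrics by sample/example.
--
--     Detects sample boundaries by:
--     - Reset to first chunk (seq_len_q == seq_len_k and seq_len_q >= chunk_threshold) after generation (seq_len_q == 1)
--     """
--     if not metrics:
--         return []
--
--     samples: List[List[Dict]] = []
--     current_sample: List[Dict] = []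
--
--     prev_seq_len_q = None
--
--     for metric in metrics:
--         metadata = metric.get("metadata", {})
--         seq_len_q = metadata.get("seq_len_q", 0)
--         seq_len_k = metadata.get("seq_len_k", 0)
--
--         # Detect new sample: reset to first chunk after generation
--         is_new_sample = False
--
--         if prev_seq_len_q == 1 and seq_len_q == seq_len_k and seq_len_q >= chunk_threshold:
--             is_new_sample = True
--
--         if is_new_sample and current_sample:
--             samples.append(current_sample)
--             current_sample = []
--
--         current_sample.append(metric)
--         prev_seq_len_q = seq_len_q
--
--     # Add last sample
--     if current_sample:
--         samples.append(current_sample)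
--
--     return samples
--
-- def group_mask_metrics_by_sample(metrics: List[Dict], chunk_threshold: int = 100, filter_layer: int = 15) -> List[List[Dict]]:
--     """Group mask metrics by sample, filtering to specified layer."""
--     if not metrics:
--         return []
--
--     # Filter to only specified layer first
--     filtered_metrics = [
--         m for m in metrics
--         if m.get("metadata", {}).get("layer_idx", -1) == filter_layer
--     ]
--
--     return group_metrics_by_sample(filtered_metrics, chunk_threshold)
-- ===== SOURCE B (Python) =====
-- def group_mask_metrics_by_sample(metrics, chunk_threshold=100, filter_layer=15):
--     """Two-phase index method: compute sample-start indices from consecutive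
--     (seq_len_q, seq_len_k) pairs of the layer-filtered rows, then slice."""
--     kept = [m for m in metrics
--             if m.get("metadata", {}).get("layer_idx", -1) == filter_layer]
--     if not kept:
--         return []
--     qk = [(m.get("metadata", {}).get("seq_len_q", 0),
--            m.get("metadata", {}).get("seq_len_k", 0)) for m in kept]
--     starts = [0] + [i for i, (prev, cur) in enumerate(zip(qk, qk[1:]), 1)
--                     if prev[0] == 1 and cur[0] == cur[1] and cur[0] >= chunk_threshold]
--     ends = starts[1:] + [len(kept)]
--     return [kept[s:e] for s, e in zip(starts, ends)]
-- ===== Notes on version B (the rewrite author's own statement) =====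
-- stated objective: alternative
-- what changed: Replaces A's stateful accumulator loop (running current_sample and prev_seq_len_q, flushed at boundaries) by a two-phase index method: compute the sample-start indices from consecutive (seq_len_q, seq_len_k) pairs of the layer-filtered rows via enumerate(zip(qk, qk[1:])), then cut the filtered list into slices at those indices.
import Mathlib
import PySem

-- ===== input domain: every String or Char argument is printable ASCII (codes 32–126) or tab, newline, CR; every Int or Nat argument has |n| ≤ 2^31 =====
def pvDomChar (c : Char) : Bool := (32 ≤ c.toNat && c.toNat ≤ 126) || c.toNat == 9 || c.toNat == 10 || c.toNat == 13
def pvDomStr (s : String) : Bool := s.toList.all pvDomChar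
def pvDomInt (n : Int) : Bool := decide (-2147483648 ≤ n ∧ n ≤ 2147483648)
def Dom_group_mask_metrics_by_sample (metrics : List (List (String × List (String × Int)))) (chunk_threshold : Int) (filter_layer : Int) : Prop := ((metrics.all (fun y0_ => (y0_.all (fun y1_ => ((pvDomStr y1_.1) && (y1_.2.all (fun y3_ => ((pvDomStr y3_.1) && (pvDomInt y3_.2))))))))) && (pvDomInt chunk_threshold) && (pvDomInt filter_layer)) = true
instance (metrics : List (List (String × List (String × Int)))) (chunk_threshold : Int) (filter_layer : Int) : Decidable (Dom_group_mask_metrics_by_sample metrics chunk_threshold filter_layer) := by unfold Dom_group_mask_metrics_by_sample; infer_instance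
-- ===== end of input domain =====

-- B replaces A's accumulator loop (running current_sample/prev state) by a two-phase
-- index method: compute the sample-start indices from consecutive (seq_len_q, seq_len_k)
-- pairs of the layer-filtered rows, then slice the filtered list at those indices.
-- Objective: alternative (same O(n) cost, different algorithmic decomposition).

-- shared primitive: Python's dict.get(k, dflt) as first-match lookup on an assoc list
def pvGetD {α : Type} (d : List (String × α)) (k : String) (dflt : α) : α :=
  match d with
  | [] => dflt
  | (k', v) :: rest => if k' == k then v else pvGetD rest k dflt

-- ===== PORT A =====
-- one iteration of group_metrics_by_sample's loop: state = (samples, current_sample, prev_seq_len_q)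
def pvStepA (chunk_threshold : Int)
    (st : List (List (List (String × List (String × Int)))) × List (List (String × List (String × Int))) × Option Int)
    (metric : List (String × List (String × Int))) :
    List (List (List (String × List (String × Int)))) × List (List (String × List (String × Int))) × Option Int :=
  let (samples, current, prev) := st
  let metadata := pvGetD metric "metadata" []
  let seq_len_q := pvGetD metadata "seq_len_q" 0
  let seq_len_k := pvGetD metadata "seq_len_k" 0
  let is_new_sample := prev = some 1 ∧ seq_len_q = seq_len_k ∧ chunk_threshold ≤ seq_len_q
  let (samples, current) :=
    if is_new_sample ∧ current ≠ [] then (samples ++ [current], []) else (samples, current)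
  (samples, current ++ [metric], some seq_len_q)

def pvGroupMetricsBySample (metrics : List (List (String × List (String × Int)))) (chunk_threshold : Int) :
    List (List (List (String × List (String × Int)))) :=
  if metrics = [] then []
  else
    let st := metrics.foldl (pvStepA chunk_threshold) ([], [], none)
    if st.2.1 ≠ [] then st.1 ++ [st.2.1] else st.1

def group_mask_metrics_by_sample (metrics : List (List (String × List (String × Int)))) (chunk_threshold : Int) (filter_layer : Int) : List (List (List (String × List (String × Int)))) :=
  if metrics = [] then []
  else
    let filtered_metrics := metrics.filter
      (fun m => pvGetD (pvGetD m "metadata" []) "layer_idx" (-1) = filter_layer)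
    pvGroupMetricsBySample filtered_metrics chunk_threshold

-- ===== PORT B =====
-- (seq_len_q, seq_len_k) of one row
def pvQK (m : List (String × List (String × Int))) : Int × Int :=
  let md := pvGetD m "metadata" []
  (pvGetD md "seq_len_q" 0, pvGetD md "seq_len_k" 0)

-- the boundary test on a consecutive pair (prev, cur)
def pvPred (ct : Int) (p c : Int × Int) : Bool :=
  p.1 == 1 && c.1 == c.2 && decide (ct ≤ c.1)

-- two-phase: boundary indices from zip(qk, qk[1:]) enumerated from 1, then slices
def group_mask_metrics_by_sample_alt (metrics : List (List (String × List (String × Int)))) (chunk_threshold : Int) (filter_layer : Int) : List (List (List (String × List (String × Int)))) :=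
  let kept := metrics.filter
    (fun m => pvGetD (pvGetD m "metadata" []) "layer_idx" (-1) = filter_layer)
  if kept = [] then []
  else
    let qk := kept.map pvQK
    let starts := (0 : Int) ::
      ((PySem.List.enumerate (qk.zip (PySem.List.slice qk (some 1) none)) 1).filter
        (fun ic => pvPred chunk_threshold ic.2.1 ic.2.2)).map (·.1)
    let ends := PySem.List.slice starts (some 1) none ++ [(kept.length : Int)]
    (starts.zip ends).map (fun se => PySem.List.slice kept (some se.1) (some se.2))

-- ===== PRECONDITION & SPEC =====
def Spec_group_mask_metrics_by_sample (metrics : List (List (String × List (String × Int)))) (chunk_threshold : Int) (filter_layer : Int) (out : List (List (List (String × List (String × Int))))) : Prop := out = group_mask_metrics_by_sample_alt metrics chunk_threshold filter_layer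
instance (metrics : List (List (String × List (String × Int)))) (chunk_threshold : Int) (filter_layer : Int) (out : List (List (List (String × List (String × Int))))) : Decidable (Spec_group_mask_metrics_by_sample metrics chunk_threshold filter_layer out) := by unfold Spec_group_mask_metrics_by_sample; infer_instance

-- ===== CLAIM (what is proved, stated in full; the proofs are below) =====
def Claim_equal_group_mask_metrics_by_sample : Prop := ∀ (metrics : List (List (String × List (String × Int)))) (chunk_threshold : Int) (filter_layer : Int), Dom_group_mask_metrics_by_sample metrics chunk_threshold filter_layer → Spec_group_mask_metrics_by_sample metrics chunk_threshold filter_layer (group_mask_metrics_by_sample metrics chunk_threshold filter_layer)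

-- ===== LEMMAS AND PROOFS =====

abbrev Met := List (String × List (String × Int))

-- A's loop continuation as a recursion on the remaining rows (current group C nonempty)
def gAux (ct : Int) : Int → List Met → List Met → List (List Met)
  | _, C, [] => [C]
  | p, C, m :: rest =>
      if p = 1 ∧ (pvQK m).1 = (pvQK m).2 ∧ ct ≤ (pvQK m).1 then
        C :: gAux ct (pvQK m).1 [m] rest
      else gAux ct (pvQK m).1 (C ++ [m]) rest

def mapHead {α : Type} (f : α → α) : List α → List α
  | [] => []
  | h :: t => f h :: t

-- boundary index list, with running start index s
def fIdx (ct : Int) : Int → List (Int × Int) → List Int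
  | _, [] => []
  | _, [_] => []
  | s, a :: b :: r => (if pvPred ct a b then [s] else []) ++ fIdx ct (s + 1) (b :: r)

-- adjacent pairs (s, x1), (x1, x2), …, (xk, n)
def adjPairs : Int → List Int → Int → List (Int × Int)
  | s, [], n => [(s, n)]
  | s, x :: xs, n => (s, x) :: adjPairs x xs n

-- ---- step / final reshaping of A ----

lemma stepA_eq (ct : Int) (S : List (List Met)) (C : List Met) (prev : Option Int) (m : Met) :
    pvStepA ct (S, C, prev) m =
      if prev = some 1 ∧ (pvQK m).1 = (pvQK m).2 ∧ ct ≤ (pvQK m).1 ∧ C ≠ [] then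
        (S ++ [C], [m], some (pvQK m).1)
      else (S, C ++ [m], some (pvQK m).1) := by
  simp only [pvStepA, pvQK]
  generalize pvGetD (pvGetD m "metadata" []) "seq_len_q" 0 = q
  generalize pvGetD (pvGetD m "metadata" []) "seq_len_k" 0 = k
  by_cases h : prev = some 1 ∧ q = k ∧ ct ≤ q ∧ C ≠ []
  · rw [if_pos (show (prev = some 1 ∧ q = k ∧ ct ≤ q) ∧ ¬C = [] by tauto), if_pos h]
    simp
  · rw [if_neg (by tauto), if_neg h]

def pvFinal (st : List (List Met) × List Met × Option Int) : List (List Met) :=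
  if st.2.1 ≠ [] then st.1 ++ [st.2.1] else st.1

lemma foldA_eq (ct : Int) (l : List Met) :
    ∀ (S : List (List Met)) (C : List Met) (p : Int), C ≠ [] →
    pvFinal (l.foldl (pvStepA ct) (S, C, some p)) = S ++ gAux ct p C l := by
  induction l with
  | nil => intro S C p hC; simp [pvFinal, gAux, hC]
  | cons m rest ih =>
    intro S C p hC
    rw [List.foldl_cons, stepA_eq]
    by_cases h : p = 1 ∧ (pvQK m).1 = (pvQK m).2 ∧ ct ≤ (pvQK m).1
    · rw [if_pos ⟨by rw [h.1], h.2.1, h.2.2, hC⟩]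
      rw [ih (S ++ [C]) [m] (pvQK m).1 (by simp)]
      conv_rhs => simp only [gAux]
      rw [if_pos h]
      simp
    · rw [if_neg (by simp [Option.some.injEq]; tauto)]
      rw [ih S (C ++ [m]) (pvQK m).1 (by simp)]
      simp only [gAux]
      rw [if_neg h]

-- prepending to the current group prepends to the first output group
lemma gAux_cons (ct : Int) (l : List Met) :
    ∀ (p : Int) (x : Met) (C : List Met),
    gAux ct p (x :: C) l = mapHead (fun g => x :: g) (gAux ct p C l) := by
  induction l with
  | nil => intro p x C; simp [gAux, mapHead]
  | cons m rest ih =>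
    intro p x C
    simp only [gAux]
    by_cases h : p = 1 ∧ (pvQK m).1 = (pvQK m).2 ∧ ct ≤ (pvQK m).1
    · rw [if_pos h, if_pos h]; simp [mapHead]
    · rw [if_neg h, if_neg h, show (x :: C) ++ [m] = x :: (C ++ [m]) by simp, ih]

-- ---- B-side reshaping ----

-- the port's boundary-index expression is fIdx
lemma enum_filter_eq_fIdx (ct : Int) (qk : List (Int × Int)) :
    ∀ s : Int,
    ((PySem.List.enumerate (qk.zip qk.tail) s).filter
        (fun ic => pvPred ct ic.2.1 ic.2.2)).map (·.1) = fIdx ct s qk := by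
  induction qk with
  | nil => intro s; simp [fIdx]
  | cons a t ih =>
    intro s
    cases t with
    | nil => simp [fIdx]
    | cons b r =>
      simp only [List.tail_cons, List.zip_cons_cons, PySem.List.enumerate_cons, fIdx]
      have ih' := ih (s + 1)
      simp only [List.tail_cons] at ih'
      cases h : pvPred ct a b <;>
        simp [h, ih']

lemma fIdx_shift (ct : Int) (qk : List (Int × Int)) :
    ∀ s : Int, fIdx ct (s + 1) qk = (fIdx ct s qk).map (· + 1) := by
  induction qk with
  | nil => intro s; simp [fIdx]
  | cons a t ih =>
    intro s
    cases t with
    | nil => simp [fIdx]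
    | cons b r =>
      simp only [fIdx, List.map_append]
      rw [ih (s + 1)]
      by_cases h : pvPred ct a b <;> simp [h]

lemma fIdx_nonneg (ct : Int) (qk : List (Int × Int)) :
    ∀ s : Int, 0 ≤ s → ∀ i ∈ fIdx ct s qk, 0 ≤ i := by
  induction qk with
  | nil => intro s _ i hi; simp [fIdx] at hi
  | cons a t ih =>
    intro s hs i hi
    cases t with
    | nil => simp [fIdx] at hi
    | cons b r =>
      simp only [fIdx, List.mem_append] at hi
      rcases hi with hi | hi
      · split_ifs at hi <;> simp_all
      · exact ih (s + 1) (by omega) i hi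

lemma zip_eq_adjPairs (F : List Int) :
    ∀ (s n : Int), (s :: F).zip (F ++ [n]) = adjPairs s F n := by
  induction F with
  | nil => intro s n; simp [adjPairs]
  | cons x xs ih => intro s n; simp only [List.cons_append, List.zip_cons_cons, adjPairs, ih]

lemma adjPairs_shift (X : List Int) :
    ∀ (s n : Int), adjPairs (s + 1) (X.map (· + 1)) (n + 1) =
      (adjPairs s X n).map (fun p => (p.1 + 1, p.2 + 1)) := by
  induction X with
  | nil => intro s n; simp [adjPairs]
  | cons x xs ih => intro s n; simp only [List.map_cons, adjPairs, ih, List.map]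

lemma adjPairs_bounds (X : List Int) :
    ∀ (s n : Int), 0 ≤ s → 0 ≤ n → (∀ i ∈ X, 0 ≤ i) →
    ∀ p ∈ adjPairs s X n, 0 ≤ p.1 ∧ 0 ≤ p.2 := by
  induction X with
  | nil => intro s n hs hn _ p hp; simp [adjPairs] at hp; simp [hp, hs, hn]
  | cons x xs ih =>
    intro s n hs hn hX p hp
    simp only [adjPairs, List.mem_cons] at hp
    rcases hp with hp | hp
    · subst hp; exact ⟨hs, hX x (by simp)⟩
    · exact ih x n (hX x (by simp)) hn (fun i hi => hX i (by simp [hi])) p hp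

-- slice over cons, nonnegative Int bounds
lemma slice_cons_succ {α : Type} (x : α) (l : List α) (s e : Int) (hs : 0 ≤ s) (he : 0 ≤ e) :
    PySem.List.slice (x :: l) (some (s + 1)) (some (e + 1)) =
      PySem.List.slice l (some s) (some e) := by
  rw [PySem.List.slice_toNat _ (by omega) (by omega),
      PySem.List.slice_toNat _ hs he]
  have h1 : (s + 1).toNat = s.toNat + 1 := by omega
  have h2 : (e + 1).toNat = e.toNat + 1 := by omega
  simp [h1, h2]

lemma slice_cons_zero {α : Type} (x : α) (l : List α) (e : Int) (he : 0 ≤ e) :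
    PySem.List.slice (x :: l) (some 0) (some (e + 1)) =
      x :: PySem.List.slice l (some 0) (some e) := by
  rw [PySem.List.slice_toNat _ (by omega) (by omega),
      PySem.List.slice_toNat _ (by omega) he]
  have h2 : (e + 1).toNat = e.toNat + 1 := by omega
  simp [h2]

-- B's groups of a nonempty kept list, written with fIdx/adjPairs
def gSlices (ct : Int) (kept : List Met) : List (List Met) :=
  (adjPairs 0 (fIdx ct 1 (kept.map pvQK)) (kept.length : Int)).map
    (fun se => PySem.List.slice kept (some se.1) (some se.2))

-- the two shifted-slice transports
lemma map_slice_shift (m : Met) (l : List Met) (P : List (Int × Int))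
    (hP : ∀ p ∈ P, 0 ≤ p.1 ∧ 0 ≤ p.2) :
    (P.map (fun p => (p.1 + 1, p.2 + 1))).map
        (fun se => PySem.List.slice (m :: l) (some se.1) (some se.2)) =
      P.map (fun se => PySem.List.slice l (some se.1) (some se.2)) := by
  rw [List.map_map]
  apply List.map_congr_left
  intro p hp
  exact slice_cons_succ m l p.1 p.2 (hP p hp).1 (hP p hp).2

-- main B-side lemma: the slice construction computes A's continuation
lemma pvPred_iff (ct : Int) (p c : Int × Int) :
    pvPred ct p c = true ↔ (p.1 = 1 ∧ c.1 = c.2 ∧ ct ≤ c.1) := by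
  simp [pvPred]; tauto

lemma gSlices_eq_gAux (ct : Int) (rest : List Met) :
    ∀ m : Met, gSlices ct (m :: rest) = gAux ct (pvQK m).1 [m] rest := by
  induction rest with
  | nil =>
    intro m
    simp only [gSlices, List.map_cons, List.map_nil, fIdx, adjPairs, gAux]
    simp [PySem.List.slice_toNat]
  | cons m' r ih =>
    intro m
    have hF1 : ∀ i ∈ fIdx ct 1 (pvQK m' :: r.map pvQK), 0 ≤ i :=
      fIdx_nonneg ct (pvQK m' :: r.map pvQK) 1 (by omega)
    have hshift : fIdx ct 2 (pvQK m' :: r.map pvQK) =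
        (fIdx ct 1 (pvQK m' :: r.map pvQK)).map (· + 1) := by
      rw [show (2 : Int) = 1 + 1 by norm_num]
      exact fIdx_shift ct (pvQK m' :: r.map pvQK) 1
    have hIH : gAux ct (pvQK m').1 [m'] r =
        (adjPairs 0 (fIdx ct 1 (pvQK m' :: r.map pvQK)) ((r.length : Int) + 1)).map
          (fun se => PySem.List.slice (m' :: r) (some se.1) (some se.2)) := by
      have h0 := ih m'
      simp only [gSlices, List.map_cons, List.length_cons] at h0
      push_cast at h0
      exact h0.symm
    simp only [gSlices, List.map_cons, List.length_cons]
    push_cast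
    simp only [fIdx]
    rw [show (1 : Int) + 1 = 2 by norm_num, hshift]
    by_cases hb : pvPred ct (pvQK m) (pvQK m') = true
    · -- boundary between m and m': [m] closes, the tail is grouped as before (shifted)
      have hp : (pvQK m).1 = 1 ∧ (pvQK m').1 = (pvQK m').2 ∧ ct ≤ (pvQK m').1 :=
        (pvPred_iff ct _ _).mp hb
      rw [if_pos hb]
      have hsh := adjPairs_shift (fIdx ct 1 (pvQK m' :: r.map pvQK)) 0 ((r.length : Int) + 1)
      rw [zero_add] at hsh
      simp only [List.singleton_append, adjPairs, hsh, List.map_cons]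
      rw [map_slice_shift m (m' :: r) _
        (adjPairs_bounds _ 0 _ (by omega) (by positivity) hF1)]
      have h01 : PySem.List.slice (m :: m' :: r) (some 0) (some 1) = [m] := by
        rw [PySem.List.slice_toNat _ (by omega) (by omega)]; rfl
      rw [h01]
      conv_rhs => simp only [gAux]
      rw [if_pos hp, ← hIH]
    · -- no boundary: m joins the first group of the tail's grouping
      have hp : ¬ ((pvQK m).1 = 1 ∧ (pvQK m').1 = (pvQK m').2 ∧ ct ≤ (pvQK m').1) :=
        fun hc => hb ((pvPred_iff ct _ _).mpr hc)
      rw [if_neg hb]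
      have hR : gAux ct (pvQK m).1 [m] (m' :: r) =
          mapHead (fun g => m :: g) (gAux ct (pvQK m').1 [m'] r) := by
        simp only [gAux]; rw [if_neg hp]
        exact gAux_cons ct r (pvQK m').1 m [m']
      rw [hR, hIH]
      cases hFc : fIdx ct 1 (pvQK m' :: r.map pvQK) with
      | nil =>
        simp only [List.map_nil, List.nil_append, adjPairs, List.map_cons, mapHead]
        rw [slice_cons_zero m (m' :: r) ((r.length : Int) + 1) (by positivity)]
      | cons x xs =>
        have hx : 0 ≤ x := hF1 x (by simp [hFc])
        have hxs : ∀ i ∈ xs, 0 ≤ i := fun i hi => hF1 i (by simp [hFc, hi])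
        have hsh := adjPairs_shift xs x ((r.length : Int) + 1)
        simp only [List.map_cons, List.nil_append, adjPairs, hsh, mapHead]
        rw [map_slice_shift m (m' :: r) _
          (adjPairs_bounds xs x _ hx (by positivity) hxs)]
        rw [slice_cons_zero m (m' :: r) x hx]

-- the port's body for nonempty kept is gSlices
lemma altBody_eq_gSlices (ct fl : Int) (metrics : List Met)
    (kept : List Met)
    (hk : kept = metrics.filter (fun m => pvGetD (pvGetD m "metadata" []) "layer_idx" (-1) = fl))
    (hne : kept ≠ []) :
    group_mask_metrics_by_sample_alt metrics ct fl = gSlices ct kept := by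
  simp only [group_mask_metrics_by_sample_alt, ← hk, if_neg hne, gSlices]
  rw [PySem.List.slice_from_one, PySem.List.slice_from_one]
  rw [show (kept.map pvQK).tail = PySem.List.slice (kept.map pvQK) (some 1) none from
    (PySem.List.slice_from_one _).symm] at *
  rw [PySem.List.slice_from_one]
  rw [enum_filter_eq_fIdx ct (kept.map pvQK) 1]
  rw [List.tail_cons, zip_eq_adjPairs]

-- ===== VERDICT (by name: the statement is the Claim_ definition above) =====
theorem group_mask_metrics_by_sample_spec : Claim_equal_group_mask_metrics_by_sample := by
  intro metrics ct fl _
  show group_mask_metrics_by_sample metrics ct fl = group_mask_metrics_by_sample_alt metrics ct fl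
  by_cases hm : metrics = []
  · subst hm; rfl
  · set kept := metrics.filter (fun m => pvGetD (pvGetD m "metadata" []) "layer_idx" (-1) = fl) with hk
    by_cases hne : kept = []
    · simp only [group_mask_metrics_by_sample, group_mask_metrics_by_sample_alt,
        if_neg hm, ← hk, hne, pvGroupMetricsBySample]
      simp
    · rw [altBody_eq_gSlices ct fl metrics kept hk hne]
      cases hkc : kept with
      | nil => exact absurd hkc hne
      | cons m rest =>
        rw [gSlices_eq_gAux]
        simp only [group_mask_metrics_by_sample, if_neg hm, ← hk, pvGroupMetricsBySample,
          hkc]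
        rw [List.foldl_cons, show pvStepA ct ([], [], none) m = ([], [m], some (pvQK m).1) by
          rw [stepA_eq]; simp]
        have := foldA_eq ct rest [] [m] (pvQK m).1 (by simp)
        simp only [pvFinal] at this
        simpa using this
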